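-- pv_equiv track=rewrite | github.com/kotofeich/trixter | rearrangements_type.py | get_previous_entries
-- ===== SOURCE A (Python) =====
-- def get_previous_entries(list_entries, c):
--     rearrangement_ids = []
--     for e in list_entries:
--         rearrangement_ids.append(c.index(e))
--     rearrangement_ids = map(lambda x: x-1, rearrangement_ids)
--     rearrangement_prev = []
--     for i in rearrangement_ids:
--         if i == -1:
--             rearrangement_prev.append(None)
--         else:
--             rearrangement_prev.append(c[i])
--     return rearrangement_prev
-- ===== SOURCE B (Python) =====
-- def get_previous_entries(list_entries, c):
--     # Loop interchange: one sweep over c, filling every query's answer at the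
--     # first position where it matches, instead of a c.index scan per entry.
--     res = [None] * len(list_entries)
--     done = [False] * len(list_entries)
--     prev = None
--     for x in c:
--         for i, e in enumerate(list_entries):
--             if not done[i] and e == x:
--                 res[i] = prev
--                 done[i] = True
--         prev = x
--     if not all(done):
--         raise ValueError("entry not in c")
--     return res
-- ===== Notes on version B (the rewrite author's own statement) =====
-- stated objective: alternative
-- what changed: Interchanges the loops: instead of running c.index for each entry and post-processing indices with -1 sentinel arithmetic, B makes a single sweep over c (outer loop), filling each not-yet-answered query slot with the previously seen element at the first position where it matches.
import Mathlib
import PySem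

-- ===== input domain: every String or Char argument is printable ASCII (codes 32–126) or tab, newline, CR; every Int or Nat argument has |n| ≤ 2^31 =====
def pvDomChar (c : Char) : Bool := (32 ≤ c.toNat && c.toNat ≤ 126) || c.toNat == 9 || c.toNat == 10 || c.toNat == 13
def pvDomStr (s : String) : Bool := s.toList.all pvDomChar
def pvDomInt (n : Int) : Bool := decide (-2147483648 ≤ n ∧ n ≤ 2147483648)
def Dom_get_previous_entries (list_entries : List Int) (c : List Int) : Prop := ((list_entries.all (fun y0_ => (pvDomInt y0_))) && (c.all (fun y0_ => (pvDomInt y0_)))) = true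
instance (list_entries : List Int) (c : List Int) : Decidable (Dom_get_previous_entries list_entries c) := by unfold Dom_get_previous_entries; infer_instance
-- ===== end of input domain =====

-- B interchanges the loops: a single sweep over c fills every query's answer slot at its
-- first matching position, replacing per-entry c.index scans and -1 sentinel arithmetic
-- (objective: alternative; same asymptotic cost).

-- ===== PORT A =====
def get_previous_entries (list_entries : List Int) (c : List Int) : List (Option Int) :=
  -- first loop: rearrangement_ids.append(c.index(e)); ValueError (e ∉ c) excluded by Pre_
  let rearrangement_ids : List Int :=
    list_entries.foldl (fun acc e => acc ++ [(((PySem.List.index? c e).getD 0 : Nat) : Int)]) []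
  -- map(lambda x: x-1, …)
  let ids : List Int := rearrangement_ids.map (fun x => x - 1)
  -- second loop: None if i == -1 else c[i]
  ids.foldl (fun acc i => acc ++ [if i = -1 then none else PySem.List.pyGet? c i]) []

-- ===== PORT B =====
-- inner loop of B: for i, e in enumerate(list_entries): if not done[i] and e == x: …
-- (list_entries, res and done walked in lockstep, zipped into one list)
def pvFill (x : Int) (prev : Option Int) :
    List (Int × Option Int × Bool) → List (Option Int) × List Bool
  | [] => ([], [])
  | (e, r, d) :: rest =>
      match pvFill x prev rest with
      | (rs, ds) => if !d && e == x then (prev :: rs, true :: ds) else (r :: rs, d :: ds)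

-- one iteration of B's outer loop 'for x in c': fill the slots, then prev = x
def pvStep (list_entries : List Int)
    (st : (List (Option Int) × List Bool) × Option Int) (x : Int) :
    (List (Option Int) × List Bool) × Option Int :=
  match st with
  | ((res, done), prev) => (pvFill x prev (list_entries.zip (res.zip done)), some x)

def get_previous_entries_alt (list_entries : List Int) (c : List Int) : List (Option Int) :=
  -- res = [None]*len, done = [False]*len, prev = None; for x in c: …
  -- the final 'if not all(done): raise ValueError' fires exactly outside Pre_ (excluded);
  -- the port returns the res list built by the sweep
  (c.foldl (pvStep list_entries)
      ((list_entries.map fun _ => none, list_entries.map fun _ => false), none)).1.1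

-- ===== PRECONDITION & SPEC =====
-- Pre_: every entry occurs in c; otherwise Python A raises ValueError (c.index) and
-- B raises ValueError (its final all(done) check).
def Pre_get_previous_entries (list_entries : List Int) (c : List Int) : Prop :=
  ∀ e ∈ list_entries, e ∈ c
instance (list_entries : List Int) (c : List Int) : Decidable (Pre_get_previous_entries list_entries c) := by
  unfold Pre_get_previous_entries; infer_instance

def pvWitness_get_previous_entries : List Int × List Int := ([2, 1, 1, 3], [1, 2, 2, 3])

def Spec_get_previous_entries (list_entries : List Int) (c : List Int) (out : List (Option Int)) : Prop :=
  out = get_previous_entries_alt list_entries c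
instance (list_entries : List Int) (c : List Int) (out : List (Option Int)) :
    Decidable (Spec_get_previous_entries list_entries c out) := by
  unfold Spec_get_previous_entries; infer_instance

-- ===== CLAIM =====
def Claim_equal_get_previous_entries : Prop :=
  ∀ (list_entries : List Int) (c : List Int),
    Dom_get_previous_entries list_entries c →
    Pre_get_previous_entries list_entries c →
    Spec_get_previous_entries list_entries c (get_previous_entries list_entries c)

-- ===== LEMMAS AND PROOFS =====

-- predecessor of the FIRST occurrence of e in c (abstract description both ports meet)
def specA : List Int → Option Int → Int → Option (Option Int)
  | [], _, _ => none
  | x :: rest, prev, e => if e = x then some prev else specA rest (some x) e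

-- B's sweep restricted to ONE query slot
def pvOne (e : Int) : List Int → Option Int → Option Int → Bool → Option Int × Bool
  | [], _, r, d => (r, d)
  | x :: rest, prev, r, d =>
      if !d && e == x then pvOne e rest (some x) prev true
      else pvOne e rest (some x) r d

theorem pvFoldlPush {α β : Type} (f : α → β) :
    ∀ (l : List α) (acc : List β),
      l.foldl (fun a x => a ++ [f x]) acc = acc ++ l.map f := by
  intro l
  induction l with
  | nil => simp
  | cons x rest ih => intro acc; simp [List.foldl, ih]

theorem pvLoop_nil : ∀ (c : List Int) (prev : Option Int),
    (List.foldl (pvStep []) (([], []), prev) c).1 = ([], []) := by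
  intro c
  induction c with
  | nil => intro prev; rfl
  | cons x rest ih =>
      intro prev
      simpa [List.foldl, pvStep, pvFill] using ih (some x)

theorem pvLoop_cons :
    ∀ (c : List Int) (e : Int) (es : List Int) (prev : Option Int)
      (r : Option Int) (rs : List (Option Int)) (d : Bool) (ds : List Bool),
      (List.foldl (pvStep (e :: es)) ((r :: rs, d :: ds), prev) c).1 =
        ((pvOne e c prev r d).1 :: (List.foldl (pvStep es) ((rs, ds), prev) c).1.1,
         (pvOne e c prev r d).2 :: (List.foldl (pvStep es) ((rs, ds), prev) c).1.2) := by
  intro c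
  induction c with
  | nil => intro e es prev r rs d ds; simp [pvOne]
  | cons x rest ih =>
      intro e es prev r rs d ds
      simp only [List.foldl, pvStep, List.zip, List.zipWith, pvFill, pvOne]
      by_cases h : (!d && e == x) = true
      · simp [h, ih]
      · simp [h, ih]

theorem pvOne_done (e : Int) :
    ∀ (c : List Int) (prev : Option Int) (r : Option Int),
      pvOne e c prev r true = (r, true) := by
  intro c
  induction c with
  | nil => intro prev r; rfl
  | cons x rest ih => intro prev r; simp [pvOne, ih]

theorem pvOne_spec (e : Int) :
    ∀ (c : List Int) (prev : Option Int) (r : Option Int),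
      pvOne e c prev r false =
        (match specA c prev e with
         | some p => (p, true)
         | none => (r, false)) := by
  intro c
  induction c with
  | nil => intro prev r; rfl
  | cons x rest ih =>
      intro prev r
      by_cases hex : e = x
      · simp [pvOne, specA, hex, pvOne_done]
      · simp [pvOne, specA, hex, ih]

theorem pvAlt_eq (c : List Int) :
    ∀ (le : List Int),
      get_previous_entries_alt le c = le.map (fun e => (specA c none e).getD none) := by
  intro le
  induction le with
  | nil => simpa [get_previous_entries_alt] using congrArg Prod.fst (pvLoop_nil c none)
  | cons e es ih =>
      unfold get_previous_entries_alt at *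
      simp only [List.map, pvLoop_cons, pvOne_spec]
      refine congrArg₂ List.cons ?_ ih
      cases specA c none e <;> rfl

theorem pvSpecA_index :
    ∀ (l : List Int) (prev : Option Int) (e : Int) (i : Nat),
      PySem.List.index? l e = some i →
      specA l prev e = some (if i = 0 then prev else l[i - 1]?) := by
  intro l
  induction l with
  | nil => intro prev e i h; simp [PySem.List.index?_eq_idxOf?, List.idxOf?] at h
  | cons x rest ih =>
      intro prev e i h
      by_cases hex : e = x
      · subst hex
        rw [PySem.List.index?_cons_self] at h
        cases h
        simp [specA]
      · have hx : x ≠ e := fun hh => hex hh.symm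
        rw [PySem.List.index?_cons_of_ne rest hx] at h
        simp only [Option.map_eq_some_iff] at h
        obtain ⟨j, hj, hji⟩ := h
        subst hji
        have := ih (some x) e j hj
        simp only [specA, hex, if_false]
        rw [this]
        cases j with
        | zero => simp
        | succ k => simp

theorem pvElem_eq :
    ∀ (c : List Int) (e : Int), e ∈ c →
      (if ((((PySem.List.index? c e).getD 0 : Nat) : Int) - 1) = -1 then none
       else PySem.List.pyGet? c ((((PySem.List.index? c e).getD 0 : Nat) : Int) - 1)) =
      (specA c none e).getD none := by
  intro c e he
  have hsome : (PySem.List.index? c e).isSome := (PySem.List.index?_isSome_iff c e).2 he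
  obtain ⟨i, hi⟩ := Option.isSome_iff_exists.1 hsome
  rw [pvSpecA_index c none e i hi, hi]
  cases i with
  | zero => simp
  | succ k =>
      have hcast : (((k + 1 : Nat) : Int) - 1) = ((k : Nat) : Int) := by push_cast; ring
      simp only [Option.getD_some, hcast, PySem.List.pyGet?_natCast]
      simp

-- ===== VERDICT =====
theorem get_previous_entries_spec : Claim_equal_get_previous_entries := by
  intro list_entries c _ hpre
  unfold Spec_get_previous_entries get_previous_entries
  rw [pvAlt_eq c list_entries]
  simp only [pvFoldlPush, List.nil_append, List.map_map]
  apply List.map_congr_left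
  intro e he
  exact pvElem_eq c e (hpre e he)
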